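-- pv_equiv track=rewrite | github.com/zhenyakeg/Final_preparation | 2nd term/_7_square_orgraph.py | make_square_orgraph
-- ===== SOURCE A (Python) =====
-- def make_square_orgraph(graph):
--     sq_graph = [[] for j in range(len(graph))]
--     def bfs(graph, start, sq_graph):
--         used = set()
--         used.add(start)
--         queue = [(start, 0)]
--         while queue:
--             vertex, time = queue.pop(0)
--
--             if time <= 2:
--                 sq_graph[start].append(vertex)
--             else:
--                 break
--             time += 1
--             for neighbour in graph[vertex]:
--                 if neighbour not in used:
--                     queue.append((neighbour, time))
--                     used.add(neighbour)
--         return sq_graph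
--     for vertex in range(len(graph)):
--         sq_graph = bfs(graph, vertex, sq_graph)
--     return sq_graph
-- ===== SOURCE B (Python) =====
-- def make_square_orgraph(graph):
--     res = []
--     for s in range(len(graph)):
--         lvl1 = [w for w in dict.fromkeys(graph[s]) if w != s]
--         lvl2 = [w for w in dict.fromkeys(x for v in lvl1 for x in graph[v])
--                 if w != s and w not in lvl1]
--         res.append([s] + lvl1 + lvl2)
--     return res
-- ===== Notes on version B (the rewrite author's own statement) =====
-- stated objective: simpler
-- what changed: Replaces A's time-tagged FIFO-queue BFS (pop(0), per-entry distance counters, mutable visited set, break) by a queue-free staged dataflow: level 1 is dict.fromkeys-dedup of the start's row minus the start, level 2 is dedup of the concatenation of the level-1 rows filtered against the earlier levels; no queue, no visited set, no loop over distances.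
import Mathlib
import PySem

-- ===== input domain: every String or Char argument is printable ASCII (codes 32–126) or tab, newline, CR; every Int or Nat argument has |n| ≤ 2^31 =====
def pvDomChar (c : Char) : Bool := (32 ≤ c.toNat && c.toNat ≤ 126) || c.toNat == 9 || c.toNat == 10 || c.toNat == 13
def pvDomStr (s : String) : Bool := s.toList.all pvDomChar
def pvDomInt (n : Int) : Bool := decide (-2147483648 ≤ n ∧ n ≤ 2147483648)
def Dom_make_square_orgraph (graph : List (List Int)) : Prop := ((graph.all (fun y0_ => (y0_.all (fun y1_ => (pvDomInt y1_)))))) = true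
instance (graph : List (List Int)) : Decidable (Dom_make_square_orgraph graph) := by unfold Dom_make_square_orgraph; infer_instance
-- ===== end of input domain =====

-- B replaces A's time-tagged FIFO-queue BFS (pop(0), per-entry distance counters, mutable
-- visited set, break) by a queue-free staged dataflow: dedup/filter the start's row, then
-- dedup/filter the concatenation of the level-1 rows.

-- ===== PORT A =====

-- graph[vertex] (Python indexing, negative wrap); total form: outside Pre_ the access is an IndexError
def pvRow (graph : List (List Int)) (v : Int) : List Int :=
  (PySem.List.pyGet? graph v).getD []

-- one neighbour step of A's inner 'for neighbour in graph[vertex]' loop (state: used, queue)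
def pvStepA (t : Int) (st : PySem.Set Int × List (Int × Int)) (w : Int) :
    PySem.Set Int × List (Int × Int) :=
  if PySem.Set.contains st.1 w then st else (PySem.Set.add st.1 w, st.2 ++ [(w, t)])

-- A's 'while queue' loop; fuel only makes the recursion structural (A's loop always
-- terminates: each value is enqueued at most once; the fuel chosen below always suffices)
def pvLoopA (graph : List (List Int)) :
    Nat → PySem.Set Int → List (Int × Int) → List Int → List Int
  | 0, _, _, acc => acc
  | fuel + 1, used, queue, acc =>
    match queue with
    | [] => acc
    | (vertex, time) :: rest =>
      if time ≤ 2 then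
        let st := (pvRow graph vertex).foldl (pvStepA (time + 1)) (used, rest)
        pvLoopA graph fuel st.1 st.2 (acc ++ [vertex])
      else acc

def pvSumLens (graph : List (List Int)) : Nat := (graph.map List.length).sum

-- A's inner bfs(graph, start, sq_graph), restricted to the one row it appends to
def pvBfsA (graph : List (List Int)) (start : Int) (row : List Int) : List Int :=
  pvLoopA graph (2 + pvSumLens graph + pvSumLens graph * pvSumLens graph)
    (PySem.Set.add PySem.Set.empty start) [(start, 0)] row

def make_square_orgraph (graph : List (List Int)) : List (List Int) :=
  (List.range graph.length).foldl
    (fun sq v => sq.set v (pvBfsA graph (v : Int) (sq.getD v [])))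
    (List.replicate graph.length [])

-- ===== PORT B =====

-- one output row of B: level 1 = dedup of graph[s] minus s; level 2 = dedup of the
-- concatenated level-1 rows, minus s and level 1
def pvRowB (graph : List (List Int)) (s : Int) : List Int :=
  let lvl1 := (PySem.List.dedup (pvRow graph s)).filter (fun w => w != s)
  let lvl2 := (PySem.List.dedup (lvl1.flatMap (fun v => pvRow graph v))).filter
    (fun w => w != s && !(lvl1.contains w))
  s :: (lvl1 ++ lvl2)

def make_square_orgraph_alt (graph : List (List Int)) : List (List Int) :=
  (List.range graph.length).foldl
    (fun res (s : Nat) => res ++ [pvRowB graph (s : Int)]) []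

-- ===== PRECONDITION & SPEC =====
-- Pre_ excludes exactly the inputs where Python raises IndexError: some adjacency-list entry
-- is not a valid (possibly negative) Python index into graph — every such entry is dereferenced.
def Pre_make_square_orgraph (graph : List (List Int)) : Prop :=
  ∀ r ∈ graph, ∀ x ∈ r, -(graph.length : Int) ≤ x ∧ x < (graph.length : Int)
instance (graph : List (List Int)) : Decidable (Pre_make_square_orgraph graph) := by
  unfold Pre_make_square_orgraph; infer_instance

def pvWitness_make_square_orgraph : List (List Int) := [[1, -2], [0], [2]]

def Spec_make_square_orgraph (graph : List (List Int)) (out : List (List Int)) : Prop :=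
  out = make_square_orgraph_alt graph
instance (graph : List (List Int)) (out : List (List Int)) :
    Decidable (Spec_make_square_orgraph graph out) := by
  unfold Spec_make_square_orgraph; infer_instance

-- ===== CLAIM (what is proved, stated in full; the proofs are below) =====
def Claim_equal_make_square_orgraph : Prop :=
  ∀ (graph : List (List Int)), Dom_make_square_orgraph graph →
    Pre_make_square_orgraph graph →
    Spec_make_square_orgraph graph (make_square_orgraph graph)

-- ===== LEMMAS AND PROOFS =====

-- proof-side helpers: a level-synchronous intermediate between A's queue and B's dataflow
def pvStepB (st : PySem.Set Int × List Int) (w : Int) : PySem.Set Int × List Int :=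
  if PySem.Set.contains st.1 w then st else (PySem.Set.add st.1 w, st.2 ++ [w])

def pvStepF (graph : List (List Int)) (u : PySem.Set Int) (q : List Int) (fr : List Int) :
    PySem.Set Int × List Int :=
  fr.foldl (fun st v => (pvRow graph v).foldl pvStepB st) (u, q)

-- the new elements contributed by a scan of row with visited set u
def pvNews (u : PySem.Set Int) : List Int → List Int
  | [] => []
  | w :: r => if w ∈ u then pvNews u r else w :: pvNews (PySem.Set.add u w) r

-- inner fold: A's tagged fold is pvStepB's fold with the tag mapped on and a prefix untouched
theorem inner_fold (graph : List (List Int)) (t : Int) :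
    ∀ (row : List Int) (u : PySem.Set Int) (P : List (Int × Int)) (q : List Int),
      row.foldl (pvStepA t) (u, P ++ q.map (fun w => (w, t))) =
        ((row.foldl pvStepB (u, q)).1,
          P ++ ((row.foldl pvStepB (u, q)).2).map (fun w => (w, t))) := by
  intro row
  induction row with
  | nil => intro u P q; simp
  | cons w rest ih =>
    intro u P q
    simp only [List.foldl_cons, pvStepA, pvStepB]
    by_cases h : w ∈ u
    · simp [h, ih]
    · simpa [h, List.append_assoc] using ih (PySem.Set.add u w) P (q ++ [w])

theorem level_lemma (graph : List (List Int)) (t : Int) (ht : t ≤ 2) :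
    ∀ (front : List Int) (u : PySem.Set Int) (next acc : List Int) (fuel : Nat),
      pvLoopA graph (front.length + fuel) u
        (front.map (fun w => (w, t)) ++ next.map (fun w => (w, t + 1))) acc =
      pvLoopA graph fuel (pvStepF graph u next front).1
        ((pvStepF graph u next front).2.map (fun w => (w, t + 1))) (acc ++ front) := by
  intro front
  induction front with
  | nil => intro u next acc fuel; simp [pvStepF]
  | cons v fr ih =>
    intro u next acc fuel
    have hlen : (v :: fr).length + fuel = (fr.length + fuel) + 1 := by
      simp; omega
    rw [hlen]
    simp only [List.map_cons, List.cons_append, pvLoopA, ht, if_pos]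
    rw [inner_fold graph (t + 1) (pvRow graph v) u (fr.map (fun w => (w, t))) next]
    dsimp only
    rw [ih]
    simp [pvStepF]

theorem terminal_lemma (graph : List (List Int)) :
    ∀ (fuel : Nat) (u : PySem.Set Int) (L acc : List Int),
      pvLoopA graph fuel u (L.map (fun w => (w, (3 : Int)))) acc = acc := by
  intro fuel u L acc
  cases fuel with
  | zero => rfl
  | succ f => cases L with
    | nil => rfl
    | cons v l => simp [pvLoopA]

theorem row_len_le (graph : List (List Int)) (v : Int) :
    (pvRow graph v).length ≤ pvSumLens graph := by
  unfold pvRow pvSumLens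
  cases h : PySem.List.pyGet? graph v with
  | none => simp
  | some l =>
    have hm : l ∈ graph := by
      unfold PySem.List.pyGet? at h
      obtain ⟨k, hk, hg⟩ := Option.bind_eq_some_iff.mp h
      exact List.mem_of_getElem? hg
    simpa using List.le_sum_of_mem (List.mem_map_of_mem hm)

theorem stepB_len (graph : List (List Int)) :
    ∀ (row : List Int) (st : PySem.Set Int × List Int),
      (row.foldl pvStepB st).2.length ≤ st.2.length + row.length := by
  intro row
  induction row with
  | nil => simp
  | cons w rest ih =>
    intro st
    simp only [List.foldl_cons, pvStepB]
    by_cases h : w ∈ st.1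
    · have := ih st; simp [h]; omega
    · have := ih (PySem.Set.add st.1 w, st.2 ++ [w]); simp [h] at this ⊢; omega

theorem stepF_len (graph : List (List Int)) :
    ∀ (fr : List Int) (u : PySem.Set Int) (q : List Int),
      (pvStepF graph u q fr).2.length ≤ q.length + fr.length * pvSumLens graph := by
  intro fr
  induction fr with
  | nil => simp [pvStepF]
  | cons v rest ih =>
    intro u q
    have h1 := stepB_len graph (pvRow graph v) (u, q)
    have h2 := row_len_le graph v
    have h3 := ih (List.foldl pvStepB (u, q) (pvRow graph v)).1
      (List.foldl pvStepB (u, q) (pvRow graph v)).2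
    have hstep : pvStepF graph u q (v :: rest)
        = pvStepF graph (List.foldl pvStepB (u, q) (pvRow graph v)).1
            (List.foldl pvStepB (u, q) (pvRow graph v)).2 rest := by
      simp [pvStepF]
    rw [hstep]
    simp only [List.length_cons] at *
    calc (pvStepF graph _ _ rest).2.length
        ≤ (List.foldl pvStepB (u, q) (pvRow graph v)).2.length + rest.length * pvSumLens graph := h3
      _ ≤ q.length + pvSumLens graph + rest.length * pvSumLens graph := by omega
      _ ≤ q.length + (rest.length + 1) * pvSumLens graph := by ring_nf; omega

-- the pvStepB fold is an add-fold on the set and pvNews on the output list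
theorem foldB_eq (row : List Int) :
    ∀ (u : PySem.Set Int) (q : List Int),
      row.foldl pvStepB (u, q) = (row.foldl PySem.Set.add u, q ++ pvNews u row) := by
  induction row with
  | nil => intro u q; simp [pvNews]
  | cons w rest ih =>
    intro u q
    simp only [List.foldl_cons, pvStepB, pvNews]
    by_cases h : w ∈ u
    · simp [h, ih]
    · simp [h, ih, List.append_assoc]

theorem foldl_add_eq_append (l : List Int) :
    ∀ (u : PySem.Set Int), l.foldl PySem.Set.add u = u ++ pvNews u l := by
  induction l with
  | nil => intro u; simp [pvNews]
  | cons w rest ih =>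
    intro u
    simp only [List.foldl_cons, pvNews]
    by_cases h : w ∈ u
    · simp [h, ih]
    · simp [h, ih, List.append_assoc]

theorem mem_foldl_add (l : List Int) :
    ∀ (u : PySem.Set Int) (a : Int), a ∈ l.foldl PySem.Set.add u ↔ a ∈ u ∨ a ∈ l := by
  induction l with
  | nil => intro u a; simp
  | cons w rest ih =>
    intro u a
    simp only [List.foldl_cons, ih, PySem.Set.mem_add, List.mem_cons]
    tauto

theorem mem_news (l : List Int) :
    ∀ (u : PySem.Set Int) (a : Int), a ∈ pvNews u l ↔ a ∈ l ∧ a ∉ u := by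
  induction l with
  | nil => intro u a; simp [pvNews]
  | cons w rest ih =>
    intro u a
    simp only [pvNews]
    by_cases h : w ∈ u
    · simp only [h, if_pos, ih, List.mem_cons]
      constructor
      · rintro ⟨ha, hu⟩; exact ⟨Or.inr ha, hu⟩
      · rintro ⟨ha | ha, hu⟩
        · exact absurd (ha ▸ h) hu
        · exact ⟨ha, hu⟩
    · simp only [h, if_neg, not_false_iff, List.mem_cons, ih, PySem.Set.mem_add]
      by_cases haw : a = w
      · subst haw; tauto
      · tauto

-- dict.fromkeys is pvNews from the empty visited set
theorem dedup_eq_news (l : List Int) :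
    PySem.List.dedup l = pvNews PySem.Set.empty l := by
  have h := foldl_add_eq_append l PySem.Set.empty
  simpa [PySem.List.dedup_eq_ofList, PySem.Set.ofList_eq_foldl, PySem.Set.empty] using h

-- filtering a dedup afterwards equals deduping with the rejected elements pre-visited
theorem filter_news (p : Int → Bool) (l : List Int) :
    ∀ (u v : PySem.Set Int), (∀ w, w ∈ v ↔ (w ∈ u ∨ p w = false)) →
      (pvNews u l).filter p = pvNews v l := by
  induction l with
  | nil => intro u v _; simp [pvNews]
  | cons w rest ih =>
    intro u v hv
    simp only [pvNews]
    by_cases hu : w ∈ u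
    · have hvw : w ∈ v := (hv w).2 (Or.inl hu)
      simp only [hu, hvw, if_pos]
      exact ih u v hv
    · by_cases hp : p w = true
      · have hvw : w ∉ v := by
          intro hw
          rcases (hv w).1 hw with h | h
          · exact hu h
          · rw [hp] at h; cases h
        simp only [hu, hvw, if_neg, not_false_iff, List.filter_cons, hp, if_pos]
        refine congrArg (w :: ·) (ih _ _ ?_)
        intro w'
        simp only [PySem.Set.mem_add, hv w']
        tauto
      · have hp' : p w = false := by revert hp; cases p w <;> simp
        have hvw : w ∈ v := (hv w).2 (Or.inr hp')
        simp only [hu, hvw, if_neg, not_false_iff, if_pos, List.filter_cons, hp']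
        refine ih _ _ ?_
        intro w'
        simp only [PySem.Set.mem_add, hv w']
        by_cases hw' : w' = w
        · subst hw'; simp [hp']
        · tauto
  
theorem news_append (a b : List Int) :
    ∀ (u : PySem.Set Int),
      pvNews u (a ++ b) = pvNews u a ++ pvNews (a.foldl PySem.Set.add u) b := by
  induction a with
  | nil => intro u; simp [pvNews]
  | cons w rest ih =>
    intro u
    simp only [List.cons_append, pvNews, List.foldl_cons]
    by_cases h : w ∈ u
    · simp [h, ih]
    · simp [h, ih]

-- the frontier fold concatenates the rows and scans once
theorem stepF_eq (graph : List (List Int)) (fr : List Int) :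
    ∀ (u : PySem.Set Int) (q : List Int),
      pvStepF graph u q fr =
        ((fr.flatMap (fun v => pvRow graph v)).foldl PySem.Set.add u,
          q ++ pvNews u (fr.flatMap (fun v => pvRow graph v))) := by
  induction fr with
  | nil => intro u q; simp [pvStepF, pvNews]
  | cons v rest ih =>
    intro u q
    simp only [pvStepF, List.foldl_cons, List.flatMap_cons]
    rw [foldB_eq]
    have := ih (List.foldl PySem.Set.add u (pvRow graph v)) (q ++ pvNews u (pvRow graph v))
    simp only [pvStepF] at this
    rw [this, news_append, List.foldl_append, List.append_assoc]

-- per-start: A's bfs row equals B's staged row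
theorem per_start (graph : List (List Int)) (s : Int) :
    pvBfsA graph s [] = pvRowB graph s := by
  set S := pvSumLens graph with hS
  set u0 := PySem.Set.add PySem.Set.empty s with hu0
  set E1 := pvStepF graph u0 [] [s] with hE1
  set E2 := pvStepF graph E1.1 [] E1.2 with hE2
  have hL1 : E1.2.length ≤ S := by
    have := stepF_len graph [s] u0 []
    simpa [← hE1] using this
  have hL2 : E2.2.length ≤ E1.2.length * S := by
    have := stepF_len graph E1.2 E1.1 []
    simpa [← hE2] using this
  -- A's loop, level by level
  have hL2' : E2.2.length ≤ S * S :=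
    le_trans hL2 (Nat.mul_le_mul_right S hL1)
  obtain ⟨M, hM⟩ : ∃ M, S * S = M := ⟨_, rfl⟩
  rw [hM] at hL2'
  obtain ⟨f2, hf2⟩ : ∃ f2, 1 + S + S * S = E1.2.length + f2 :=
    ⟨1 + S + M - E1.2.length, by rw [hM]; omega⟩
  obtain ⟨f3, hf3⟩ : ∃ f3, f2 = E2.2.length + f3 :=
    ⟨f2 - E2.2.length, by rw [hM] at hf2; omega⟩
  have h0 : pvBfsA graph s []
      = pvLoopA graph (1 + S + S * S) E1.1 (E1.2.map (fun w => (w, (1 : Int)))) [s] := by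
    have hfuel : 2 + pvSumLens graph + pvSumLens graph * pvSumLens graph
        = [s].length + (1 + S + S * S) := by simp [← hS]; omega
    unfold pvBfsA
    rw [hfuel, ← hu0]
    have := level_lemma graph 0 (by norm_num) [s] u0 [] [] (1 + S + S * S)
    simpa [← hE1] using this
  have h1 : pvLoopA graph (1 + S + S * S) E1.1 (E1.2.map (fun w => (w, (1 : Int)))) [s]
      = pvLoopA graph f2 E2.1 (E2.2.map (fun w => (w, (2 : Int)))) ([s] ++ E1.2) := by
    have := level_lemma graph 1 (by norm_num) E1.2 E1.1 [] [s] f2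
    rw [hf2]
    simpa [← hE2] using this
  have h2 : pvLoopA graph f2 E2.1 (E2.2.map (fun w => (w, (2 : Int)))) ([s] ++ E1.2)
      = ([s] ++ E1.2) ++ E2.2 := by
    have := level_lemma graph 2 (by norm_num) E2.2 E2.1 [] ([s] ++ E1.2) f3
    rw [hf3]
    simpa [terminal_lemma] using this
  -- B's staged values are the two levels
  have hmem_u0 : ∀ w : Int, w ∈ u0 ↔ w = s := by
    intro w; simp [hu0, PySem.Set.empty]
  have hE1v : E1 = ((pvRow graph s).foldl PySem.Set.add u0, pvNews u0 (pvRow graph s)) := by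
    rw [hE1, stepF_eq]
    simp only [List.flatMap_cons, List.flatMap_nil, List.append_nil, List.nil_append]
  have hlvl1 : (PySem.List.dedup (pvRow graph s)).filter (fun w => w != s) = E1.2 := by
    rw [dedup_eq_news, hE1v]
    refine filter_news _ _ _ _ ?_
    intro w
    simp only [hmem_u0 w, PySem.Set.empty, List.not_mem_nil, false_or, bne,
      Bool.not_eq_false', beq_iff_eq]
  have hE2v : E2 = ((E1.2.flatMap (fun v => pvRow graph v)).foldl PySem.Set.add E1.1,
      pvNews E1.1 (E1.2.flatMap (fun v => pvRow graph v))) := by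
    rw [hE2, stepF_eq]; simp
  have hmem_E1 : ∀ w : Int, w ∈ E1.1 ↔ w = s ∨ w ∈ pvRow graph s := by
    intro w
    rw [hE1v]
    simp only [mem_foldl_add, hmem_u0 w]
  have hmem_lvl1 : ∀ w : Int, w ∈ E1.2 ↔ w ∈ pvRow graph s ∧ w ≠ s := by
    intro w
    rw [hE1v]
    simp only [mem_news, hmem_u0 w]
  have hlvl2 : (PySem.List.dedup (E1.2.flatMap (fun v => pvRow graph v))).filter
      (fun w => w != s && !(E1.2.contains w)) = E2.2 := by
    rw [dedup_eq_news, hE2v]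
    refine filter_news _ _ _ _ ?_
    intro w
    simp only [hmem_E1 w, PySem.Set.empty, List.not_mem_nil, false_or,
      Bool.and_eq_false_iff, bne, Bool.not_eq_false', beq_iff_eq,
      List.contains_iff_mem, hmem_lvl1 w]
    by_cases hw : w = s
    · simp [hw]
    · simp [hw]
  rw [h0, h1, h2]
  simp only [pvRowB, hlvl1, hlvl2]
  simp

-- A's outer loop over a preallocated list of rows is the row-wise map
theorem outer_fold (g : Nat → List Int → List Int) :
    ∀ (m j : Nat) (A : List (List Int)), A.length = j →
      (List.range' j m).foldl (fun sq v => sq.set v (g v (sq.getD v []))) (A ++ List.replicate m []) =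
        A ++ (List.range' j m).map (fun v => g v []) := by
  intro m
  induction m with
  | zero => intro j A hA; simp
  | succ m ih =>
    intro j A hA
    rw [List.range'_succ]
    simp only [List.foldl_cons, List.map_cons, List.replicate_succ]
    have hget : (A ++ [] :: List.replicate m ([] : List Int)).getD j [] = [] := by
      rw [List.getD_eq_getElem?_getD, List.getElem?_append_right (by omega)]
      simp [hA]
    have hset : (A ++ [] :: List.replicate m ([] : List Int)).set j (g j [])
        = (A ++ [g j []]) ++ List.replicate m [] := by
      subst hA
      rw [List.set_append]
      simp
    rw [hget, hset, ih (j + 1) (A ++ [g j []]) (by simp [hA])]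
    simp

-- B's outer append loop is the same map
theorem appendLoop_eq_map (graph : List (List Int)) :
    ∀ (l : List Nat) (acc : List (List Int)),
      l.foldl (fun res (s : Nat) => res ++ [pvRowB graph (s : Int)]) acc
        = acc ++ l.map (fun (s : Nat) => pvRowB graph (s : Int)) := by
  intro l
  induction l with
  | nil => intro acc; simp
  | cons s rest ih => intro acc; simp [ih, List.append_assoc]

theorem ports_eq (graph : List (List Int)) :
    make_square_orgraph graph = make_square_orgraph_alt graph := by
  unfold make_square_orgraph make_square_orgraph_alt
  rw [List.range_eq_range']
  have h := outer_fold (fun v row => pvBfsA graph (v : Int) row) graph.length 0 [] rfl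
  simp only [List.nil_append] at h
  rw [h, appendLoop_eq_map graph]
  simp only [List.nil_append]
  refine List.map_congr_left (fun (v : Nat) _ => ?_)
  exact per_start graph (v : Int)

-- ===== VERDICT (by name: the statement is the Claim_ definition above) =====
theorem make_square_orgraph_spec : Claim_equal_make_square_orgraph := by
  intro graph _ _
  exact ports_eq graph
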